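-- pv_equiv track=rewrite | github.com/leeroywking/adventofcode2020 | 6/solve.py | make_group_with_individuals
-- ===== SOURCE A (Python) =====
-- def make_group_with_individuals(content):
--     groups = []
--     group = []
--     for line in content:
--         if line == "":
--             groups.append(group)
--             group = []
--         else:
--             group.append(set(line))
--     groups.append(group)
--     return groups
-- ===== SOURCE B (Python) =====
-- def make_group_with_individuals(content):
--     if "" not in content:
--         return [[set(line) for line in content]]
--     i = content.index("")
--     return [[set(line) for line in content[:i]]] + make_group_with_individuals(content[i + 1:])
-- ===== Notes on version B (the rewrite author's own statement) =====
-- stated objective: alternative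
-- what changed: Replaces the single-pass loop with a running accumulator by recursion that splits the list at the first blank line, mapping each segment to its list of character sets.
import Mathlib
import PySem

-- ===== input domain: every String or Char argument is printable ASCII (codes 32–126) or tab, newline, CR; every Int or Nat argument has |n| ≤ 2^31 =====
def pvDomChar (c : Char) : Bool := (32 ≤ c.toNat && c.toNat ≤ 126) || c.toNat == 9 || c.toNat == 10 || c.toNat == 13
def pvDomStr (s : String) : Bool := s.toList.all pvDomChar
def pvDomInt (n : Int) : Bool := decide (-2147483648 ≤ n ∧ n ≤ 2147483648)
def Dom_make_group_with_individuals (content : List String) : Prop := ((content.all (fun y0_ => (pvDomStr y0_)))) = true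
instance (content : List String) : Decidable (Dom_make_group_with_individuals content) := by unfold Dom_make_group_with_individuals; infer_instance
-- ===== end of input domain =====

-- B replaces A's single-pass accumulator loop by recursion that splits at the first blank line (objective: alternative decomposition, same return value).

-- set(line): the distinct characters of the line as 1-character strings, first occurrences in order (PySem.Set)
def pySetLine (s : String) : List String :=
  PySem.Set.ofList (s.toList.map (fun c => String.singleton c))

-- ===== PORT A =====
-- the body of A's for-loop over (groups, group)
def pvStepA (st : List (List (List String)) × List (List String)) (line : String) :
    List (List (List String)) × List (List String) :=
  if line == "" then (st.1 ++ [st.2], [])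
  else (st.1, st.2 ++ [pySetLine line])

def make_group_with_individuals (content : List String) : List (List (List String)) :=
  let st := content.foldl pvStepA ([], [])
  st.1 ++ [st.2]

-- ===== PORT B =====
-- termination helper for the recursive call on content[i+1:]
theorem pvIdxLt {content : List String} {i : ℕ}
    (h : PySem.List.index? content "" = some i) :
    (PySem.List.slice content (some ((i : Int) + 1)) none).length < content.length := by
  obtain ⟨hk, -, -⟩ := PySem.List.getElem_of_index?_eq_some h
  have e : ((i : Int) + 1) = ((i + 1 : ℕ) : Int) := by push_cast; ring
  rw [e, PySem.List.slice_from_natCast, List.length_drop]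
  omega

def make_group_with_individuals_alt (content : List String) : List (List (List String)) :=
  match h : PySem.List.index? content "" with
  | none => [content.map pySetLine]
  | some i =>
      (PySem.List.slice content none (some (i : Int))).map pySetLine ::
      make_group_with_individuals_alt (PySem.List.slice content (some ((i : Int) + 1)) none)
termination_by content.length
decreasing_by exact pvIdxLt h

-- ===== PRECONDITION & SPEC =====
def Spec_make_group_with_individuals (content : List String) (out : List (List (List String))) : Prop := out = make_group_with_individuals_alt content
instance (content : List String) (out : List (List (List String))) : Decidable (Spec_make_group_with_individuals content out) := by unfold Spec_make_group_with_individuals; infer_instance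

-- ===== CLAIM (what is proved, stated in full; the proofs are below) =====
def Claim_equal_make_group_with_individuals : Prop := ∀ (content : List String), Dom_make_group_with_individuals content → Spec_make_group_with_individuals content (make_group_with_individuals content)

-- ===== LEMMAS AND PROOFS =====

theorem stepA_blank (gs : List (List (List String))) (g : List (List String)) :
    pvStepA (gs, g) "" = (gs ++ [g], []) := rfl

theorem stepA_ne (gs : List (List (List String))) (g : List (List String))
    {line : String} (hl : line ≠ "") :
    pvStepA (gs, g) line = (gs, g ++ [pySetLine line]) := by
  simp [pvStepA, hl]

theorem alt_nil : make_group_with_individuals_alt [] = [[]] := by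
  rw [make_group_with_individuals_alt.eq_def]
  split
  · rfl
  · rename_i i h
    simp [PySem.List.index?] at h

theorem alt_ne_nil (content : List String) : make_group_with_individuals_alt content ≠ [] := by
  rw [make_group_with_individuals_alt.eq_def]
  split <;> simp

theorem alt_blank_cons (rest : List String) :
    make_group_with_individuals_alt ("" :: rest) = [] :: make_group_with_individuals_alt rest := by
  rw [make_group_with_individuals_alt.eq_def]
  split
  · rename_i h
    rw [PySem.List.index?_cons_self] at h
    exact absurd h (by simp)
  · rename_i i h
    rw [PySem.List.index?_cons_self] at h
    cases h
    have e1 : ((0 : ℕ) : Int) = ((0 : ℕ) : Int) := rfl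
    have e2 : (((0 : ℕ) : Int) + 1) = ((1 : ℕ) : Int) := by norm_num
    rw [e2, PySem.List.slice_from_natCast]
    rw [show ((0 : ℕ) : Int) = ((0 : ℕ) : Int) from rfl, PySem.List.slice_to_natCast]
    simp

theorem alt_cons (line : String) (rest : List String) (hl : line ≠ "") :
    make_group_with_individuals_alt (line :: rest)
      = (make_group_with_individuals_alt rest).modifyHead (pySetLine line :: ·) := by
  rcases h : PySem.List.index? rest "" with _ | i
  · have h2 : PySem.List.index? (line :: rest) "" = none := by
      rw [PySem.List.index?_cons_of_ne rest hl, h]; rfl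
    rw [make_group_with_individuals_alt.eq_def]
    split
    · conv_rhs => rw [make_group_with_individuals_alt.eq_def]
      split
      · simp
      · rename_i j hj; rw [h] at hj; exact absurd hj (by simp)
    · rename_i j hj; rw [h2] at hj; exact absurd hj (by simp)
  · have h2 : PySem.List.index? (line :: rest) "" = some (i + 1) := by
      rw [PySem.List.index?_cons_of_ne rest hl, h]; rfl
    rw [make_group_with_individuals_alt.eq_def]
    split
    · rename_i hj; rw [h2] at hj; exact absurd hj (by simp)
    · rename_i j hj
      rw [h2] at hj
      obtain rfl : j = i + 1 := by injection hj with hj; omega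
      conv_rhs => rw [make_group_with_individuals_alt.eq_def]
      split
      · rename_i hk; rw [h] at hk; exact absurd hk (by simp)
      · rename_i k hk
        rw [h] at hk
        cases hk
        have e1 : ((((i + 1 : ℕ) : Int)) + 1) = ((i + 2 : ℕ) : Int) := by push_cast; ring
        have e2 : (((i : ℕ) : Int) + 1) = ((i + 1 : ℕ) : Int) := by push_cast; ring
        rw [e1, e2, PySem.List.slice_from_natCast, PySem.List.slice_from_natCast]
        have e3 : PySem.List.slice (line :: rest) none (some ((i + 1 : ℕ) : Int))
            = line :: PySem.List.slice rest none (some ((i : ℕ) : Int)) := by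
          rw [PySem.List.slice_to_natCast, PySem.List.slice_to_natCast, List.take_succ_cons]
        rw [e3]
        simp [List.drop_succ_cons]

theorem foldA (content : List String) (groups : List (List (List String))) (group : List (List String)) :
    (content.foldl pvStepA (groups, group)).1 ++ [(content.foldl pvStepA (groups, group)).2]
    = groups ++ (make_group_with_individuals_alt content).modifyHead (group ++ ·) := by
  induction content generalizing groups group with
  | nil =>
    rw [alt_nil]
    simp
  | cons line rest ih =>
    by_cases hl : line = ""
    · subst hl
      rw [List.foldl_cons, stepA_blank, ih (groups ++ [group]) [], alt_blank_cons]
      obtain ⟨x, xs, hx⟩ := List.exists_cons_of_ne_nil (alt_ne_nil rest)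
      simp [hx]
    · rw [List.foldl_cons, stepA_ne groups group hl, ih groups (group ++ [pySetLine line]),
        alt_cons line rest hl]
      obtain ⟨x, xs, hx⟩ := List.exists_cons_of_ne_nil (alt_ne_nil rest)
      simp [hx]

-- ===== VERDICT (by name: the statement is the Claim_ definition above) =====
theorem make_group_with_individuals_spec : Claim_equal_make_group_with_individuals := by
  intro content _
  unfold Spec_make_group_with_individuals make_group_with_individuals
  refine (foldA content [] []).trans ?_
  obtain ⟨x, xs, hx⟩ := List.exists_cons_of_ne_nil (alt_ne_nil content)
  simp [hx]
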